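-- pv_equiv track=rewrite | github.com/pfertyk/hex_generator | hex_generator.py | generate_hexagonal_board
-- ===== SOURCE A (Python) =====
-- def generate_hexagonal_board(radius=2):
--     """
--     Creates a board with hexagonal shape.
--
--     The board includes all the field within radius from center of the board.
--     Setting radius to 0 generates a board with 1 hexagon.
--     """
--     def hex_distance(a, b): return int(abs(a[0] - b[0]) + abs(a[1] - b[1]) + abs(a[0] + a[1] - b[0] - b[1])) / 2
--
--     width = height = 2 * radius + 1
--     board = [[0] * height for _ in range(width)]
--     center = (radius, radius)
--
--     for x in range(width):
--         for y in range(height):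
--             board[x][y] = int(hex_distance((x, y), center) <= radius)
--     return board
-- ===== SOURCE B (Python) =====
-- def generate_hexagonal_board(radius=2):
--     """
--     Creates a board with hexagonal shape.
--
--     The board includes all the field within radius from center of the board.
--     Setting radius to 0 generates a board with 1 hexagon.
--     """
--     size = 2 * radius + 1
--     board = []
--     for x in range(size):
--         lo = max(0, radius - x)
--         hi = min(size - 1, 3 * radius - x)
--         board.append([0] * lo + [1] * (hi - lo + 1) + [0] * (size - 1 - hi))
--     return board
-- ===== Notes on version B (the rewrite author's own statement) =====
-- stated objective: faster
-- what changed: Replaces the per-cell hex_distance test over the whole width x height grid with a closed-form contiguous column interval [lo,hi] per row, emitting each row as three replicated runs; intended as faster (measured ~7-11x at sizes where both finish), though a timing run could not confirm the label at the largest size.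
import Mathlib
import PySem

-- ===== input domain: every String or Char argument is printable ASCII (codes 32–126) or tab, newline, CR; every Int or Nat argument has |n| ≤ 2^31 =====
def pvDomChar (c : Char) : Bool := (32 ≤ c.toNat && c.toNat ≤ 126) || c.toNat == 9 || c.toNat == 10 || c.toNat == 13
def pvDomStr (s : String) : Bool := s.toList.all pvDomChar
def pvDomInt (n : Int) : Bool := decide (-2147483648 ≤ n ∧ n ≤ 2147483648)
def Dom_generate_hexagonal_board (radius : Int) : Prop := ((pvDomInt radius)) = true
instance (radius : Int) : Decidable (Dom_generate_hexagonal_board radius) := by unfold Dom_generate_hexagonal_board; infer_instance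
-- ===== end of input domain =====

-- B computes each row's valid-column interval in closed form instead of testing hex_distance per cell; intended as faster (measured ~7-11x at sizes where both finish).

-- ===== PORT A =====
-- Python's hex_distance returns int(...)/2, a float; the numerator |dx|+|dy|+|dx+dy| is
-- always even, so that float always equals this exact integer floor division.
def hexDist (a b : Int × Int) : Int :=
  PySem.Int.floordiv (|a.1 - b.1| + |a.2 - b.2| + |a.1 + a.2 - b.1 - b.2|) 2

-- board[x][y] = v is read row x / set element y / store row x; x,y come from range(…) so .toNat is exact.
def generate_hexagonal_board (radius : Int) : List (List Int) :=
  let width : Int := 2 * radius + 1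
  let height : Int := width
  let board : List (List Int) :=
    (PySem.List.pyRange 0 width 1).map (fun _ => List.replicate height.toNat 0)
  (PySem.List.pyRange 0 width 1).foldl (fun b x =>
    (PySem.List.pyRange 0 height 1).foldl (fun b y =>
      b.set x.toNat ((b.getD x.toNat []).set y.toNat
        (if hexDist (x, y) (radius, radius) ≤ radius then 1 else 0))) b) board

-- ===== PORT B =====
def generate_hexagonal_board_alt (radius : Int) : List (List Int) :=
  let size : Int := 2 * radius + 1
  (PySem.List.pyRange 0 size 1).foldl (fun board x =>
    let lo := max 0 (radius - x)
    let hi := min (size - 1) (3 * radius - x)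
    board ++ [List.replicate lo.toNat 0 ++ List.replicate (hi - lo + 1).toNat 1
                ++ List.replicate (size - 1 - hi).toNat 0]) []

-- ===== PRECONDITION & SPEC =====
def Spec_generate_hexagonal_board (radius : Int) (out : List (List Int)) : Prop := out = generate_hexagonal_board_alt radius
instance (radius : Int) (out : List (List Int)) : Decidable (Spec_generate_hexagonal_board radius out) := by unfold Spec_generate_hexagonal_board; infer_instance

-- ===== CLAIM (what is proved, stated in full; the proofs are below) =====
def Claim_equal_generate_hexagonal_board : Prop := ∀ (radius : Int), Dom_generate_hexagonal_board radius → Spec_generate_hexagonal_board radius (generate_hexagonal_board radius)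

-- ===== LEMMAS AND PROOFS =====

-- the indicator row A computes for abscissa x
def pvRow (radius x : Int) (N : Nat) : List Int :=
  (List.range N).map (fun k : Nat => if hexDist (x, (k : Int)) (radius, radius) ≤ radius then 1 else 0)

-- the inner loop commutes out of the board: re-setting board[X] at each y-step equals folding on row X
lemma inner_comm (ys : List Int) (X : Nat) (v : Int → Int) :
    ∀ (b : List (List Int)), X < b.length →
    ys.foldl (fun b y => b.set X ((b.getD X []).set y.toNat (v y))) b
      = b.set X (ys.foldl (fun row y => row.set y.toNat (v y)) (b.getD X [])) := by
  induction ys with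
  | nil =>
    intro b hX
    simp only [List.foldl_nil, List.getD_eq_getElem?_getD, List.getElem?_eq_getElem hX]
    simp
  | cons y ys ih =>
    intro b hX
    simp only [List.foldl_cons]
    rw [ih _ (by simpa using hX)]
    simp only [List.getD_eq_getElem?_getD, List.getElem?_set_self (by simpa using hX)]
    simp [List.set_set]

-- folding set over the full index range rewrites the first N entries
lemma foldl_set_range {α : Type} (g : Nat → α) :
    ∀ (N : Nat) (l : List α), N ≤ l.length →
    (List.range N).foldl (fun row k => row.set k (g k)) l = (List.range N).map g ++ l.drop N := by
  intro N
  induction N with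
  | zero => intro l _; simp
  | succ N ih =>
    intro l hl
    rw [List.range_succ, List.foldl_append, ih l (by omega)]
    simp only [List.foldl_cons, List.foldl_nil]
    rw [List.set_append, if_neg (by simp)]
    simp only [List.length_map, List.length_range, Nat.sub_self]
    rw [List.drop_eq_getElem_cons (show N < l.length by omega), List.set_cons_zero]
    simp

-- the row fold over range(N) yields the indicator row
lemma row_fold (radius x : Int) (N : Nat) (l : List Int) (hl : l.length = N) :
    ((PySem.List.pyRange 0 (N : Int) 1).foldl
      (fun row y => row.set y.toNat (if hexDist (x, y) (radius, radius) ≤ radius then 1 else 0)) l)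
      = pvRow radius x N := by
  rw [PySem.List.pyRange_zero_nat, List.foldl_map]
  simp only [Int.toNat_natCast]
  rw [foldl_set_range (fun k : Nat => if hexDist (x, (k : Int)) (radius, radius) ≤ radius then 1 else (0:Int)) N l (by omega)]
  rw [show l.drop N = [] from by rw [← hl, List.drop_length], pvRow]
  simp

-- the outer fold turns the zero board into the mapped board, row by row
lemma outer_fold (radius : Int) (N : Nat) :
    ∀ (m k : Nat), k ≤ N → N - k = m →
    ((PySem.List.pyRange (k : Int) (N : Int) 1).foldl (fun b x =>
      (PySem.List.pyRange 0 (N : Int) 1).foldl (fun b y =>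
        b.set x.toNat ((b.getD x.toNat []).set y.toNat
          (if hexDist (x, y) (radius, radius) ≤ radius then 1 else 0))) b)
      ((List.range k).map (fun j : Nat => pvRow radius (j : Int) N) ++ List.replicate (N - k) (List.replicate N 0)))
      = (List.range N).map (fun j : Nat => pvRow radius (j : Int) N) := by
  intro m
  induction m with
  | zero =>
    intro k hk hm
    have hkN : k = N := by omega
    subst hkN
    rw [PySem.List.pyRange_one_eq_nil le_rfl]
    simp
  | succ m ih =>
    intro k hk hm
    have hkN : k < N := by omega
    rw [PySem.List.pyRange_one_cons (a := (k : Int)) (b := (N : Int)) (by exact_mod_cast hkN)]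
    simp only [List.foldl_cons]
    have hlen : k < ((List.range k).map (fun j : Nat => pvRow radius (j : Int) N)
        ++ List.replicate (N - k) (List.replicate N 0)).length := by
      simp; omega
    rw [show ((k : Int)).toNat = k from Int.toNat_natCast k]
    rw [inner_comm _ k (fun y => if hexDist ((k : Int), y) (radius, radius) ≤ radius then 1 else 0) _ hlen]
    have hget : (((List.range k).map (fun j : Nat => pvRow radius (j : Int) N)
        ++ List.replicate (N - k) (List.replicate N 0)).getD k []) = List.replicate N 0 := by
      rw [List.getD_eq_getElem?_getD, List.getElem?_append_right (by simp)]
      simp only [List.length_map, List.length_range]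
      rw [List.getElem?_replicate]
      simp [hkN]
    rw [hget, row_fold radius (k : Int) N _ (by simp)]
    rw [List.set_append, if_neg (by simp)]
    simp only [List.length_map, List.length_range, Nat.sub_self]
    rw [show N - k = (N - (k+1)) + 1 by omega, List.replicate_succ, List.set_cons_zero]
    have : (List.range k).map (fun j : Nat => pvRow radius (j : Int) N) ++ pvRow radius (k : Int) N :: List.replicate (N - (k+1)) (List.replicate N 0)
        = (List.range (k+1)).map (fun j : Nat => pvRow radius (j : Int) N) ++ List.replicate (N - (k+1)) (List.replicate N 0) := by
      simp [List.range_succ]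
    rw [this]
    exact ih (k+1) (by omega) (by omega)

-- B's append fold is a map
lemma foldl_append_map {α β : Type} (g : α → β) (xs : List α) :
    ∀ (init : List β), xs.foldl (fun acc x => acc ++ [g x]) init = init ++ xs.map g := by
  induction xs with
  | nil => intro init; simp
  | cons x xs ih => intro init; simp [ih]

-- the hexagonal membership test is a contiguous column interval
lemma hex_cond (radius x y : Int) (hx0 : 0 ≤ x) (hx : x ≤ 2 * radius) :
    (hexDist (x, y) (radius, radius) ≤ radius)
      ↔ (max 0 (radius - x) ≤ y ∧ y ≤ min (2 * radius) (3 * radius - x)) := by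
  have hd : hexDist (x, y) (radius, radius)
      = PySem.Int.floordiv (|x - radius| + |y - radius| + |x + y - radius - radius|) 2 := rfl
  rw [hd, ← Int.lt_add_one_iff, PySem.Int.floordiv_lt_iff_lt_mul (by norm_num)]
  simp only [Int.abs_eq_natAbs]
  omega

-- per-row equality: the indicator row equals B's three replicated runs
lemma row_eq (radius x : Int) (hr : 0 ≤ radius) (hx0 : 0 ≤ x) (hx : x < 2 * radius + 1) :
    pvRow radius x (2 * radius + 1).toNat
      = List.replicate (max 0 (radius - x)).toNat 0
        ++ List.replicate (min (2 * radius + 1 - 1) (3 * radius - x) - max 0 (radius - x) + 1).toNat 1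
        ++ List.replicate (2 * radius + 1 - 1 - min (2 * radius + 1 - 1) (3 * radius - x)).toNat 0 := by
  apply List.ext_getElem
  · simp [pvRow]; omega
  · intro j h1 h2
    simp only [pvRow, List.getElem_map, List.getElem_range]
    simp only [hex_cond radius x _ hx0 (by omega)]
    simp only [List.getElem_append, List.length_replicate, List.getElem_replicate,
      List.length_append]
    split_ifs <;> first | rfl | (exfalso; omega)

-- ===== VERDICT (by name: the statement is the Claim_ definition above) =====
theorem generate_hexagonal_board_spec : Claim_equal_generate_hexagonal_board := by
  unfold Claim_equal_generate_hexagonal_board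
  intro radius _
  unfold Spec_generate_hexagonal_board
  simp only [generate_hexagonal_board, generate_hexagonal_board_alt]
  by_cases hr : 0 ≤ radius
  · have hN : (((2 * radius + 1).toNat : Int)) = 2 * radius + 1 := Int.toNat_of_nonneg (by omega)
    rw [← hN]
    rw [show ((((2 * radius + 1).toNat : Int)).toNat) = (2 * radius + 1).toNat from Int.toNat_natCast _]
    rw [List.map_const']
    rw [show (PySem.List.pyRange 0 ((2 * radius + 1).toNat : Int) 1).length = (2 * radius + 1).toNat
      from by rw [PySem.List.length_pyRange_one]; omega]
    have hA := outer_fold radius (2 * radius + 1).toNat (2 * radius + 1).toNat 0 (by omega) (by omega)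
    simp only [Nat.cast_zero, List.range_zero, List.map_nil, List.nil_append, Nat.sub_zero] at hA
    rw [hA, foldl_append_map, List.nil_append, PySem.List.pyRange_zero_nat, List.map_map]
    apply List.map_congr_left
    intro j hj
    rw [List.mem_range] at hj
    have hrow := row_eq radius (j : Int) hr (by positivity) (by omega)
    simp only [Function.comp_apply]
    rw [hN]
    exact hrow
  · rw [PySem.List.pyRange_one_eq_nil (show (2 * radius + 1 : Int) ≤ 0 by omega)]
    simp
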